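-- pv_equiv track=rewrite | github.com/AdityaNarayanmcw/Smart-Assistant | dataset_modification.py | normalize_sentence
-- ===== SOURCE A (Python) =====
-- from collections import defaultdict
--
-- intent_map = defaultdict(lambda: "command")
--
-- devices = ["camera", "lights", "music", "shutters"]
--
-- locations = ["attic", "backyard", "basement", "bathroom", "cellar", "kitchen", "library",
--              "living room", "none", "outside", "restroom", "toilet", "dining room"]
--
-- nlp = None
--
-- def normalize_sentence(sentence, category=None, subcategory=None, action=None):
--     """
--     Normalize a sentence into a structured meaning representation.
--     Args:
--         sentence (str): Input sentence.
--         category, subcategory, action (str): Metadata from dataset.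
--     Returns:
--         dict: Structured representation with intent, action, device, location.
--     """
--     if nlp:
--         doc = nlp(sentence.lower())
--     else:
--         doc = sentence.lower().split()
--
--     intent = "unknown"
--     device = category.lower() if category else "none"
--     location = subcategory.lower() if subcategory else "none"
--     action_slot = action.lower() if action else "none"
--
--     if action_slot in intent_map:
--         intent = intent_map[action_slot]
--     else:
--         command_verbs = ["turn", "activate", "play", "stop", "adjust"]
--         query_verbs = ["check", "query", "status"]
--         for token in doc if nlp else doc:
--             token_text = token.text if nlp else token
--             if token_text in command_verbs:
--                 intent = "command"
--             elif token_text in query_verbs: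
--                 intent = "query"
--
--     if not category:
--         for token in doc if nlp else doc:
--             token_text = token.text if nlp else token
--             if token_text in devices:
--                 device = token_text
--                 break
--     if not subcategory:
--         for token in doc if nlp else doc:
--             token_text = token.text if nlp else token
--             if token_text in locations:
--                 location = token_text
--                 break
--
--     return {
--         "intent": intent,
--         "action": action_slot,
--         "device": device,
--         "location": location
--     }
-- ===== SOURCE B (Python) =====
-- from collections import defaultdict
--
-- intent_map = defaultdict(lambda: "command")
--
-- devices = ["camera", "lights", "music", "shutters"]
--
-- locations = ["attic", "backyard", "basement", "bathroom", "cellar", "kitchen", "library",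
--              "living room", "none", "outside", "restroom", "toilet", "dining room"]
--
-- nlp = None
--
-- COMMAND_VERBS = ["turn", "activate", "play", "stop", "adjust"]
-- QUERY_VERBS = ["check", "query", "status"]
--
--
-- def normalize_sentence(sentence, category=None, subcategory=None, action=None):
--     """Single fused pass over the tokens instead of A's three separate scans."""
--     doc = nlp(sentence.lower()) if nlp else sentence.lower().split()
--
--     action_slot = action.lower() if action else "none"
--     in_map = action_slot in intent_map
--     intent = intent_map[action_slot] if in_map else "unknown"
--     device = category.lower() if category else None
--     location = subcategory.lower() if subcategory else None
--
--     for token in doc: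
--         t = token.text if nlp else token
--         if not in_map:
--             if t in COMMAND_VERBS:
--                 intent = "command"          # last matching verb wins, as in A
--             elif t in QUERY_VERBS:
--                 intent = "query"
--         if device is None and t in devices:
--             device = t                       # first match only
--         if location is None and t in locations:
--             location = t                     # first match only
--
--     return {
--         "intent": intent,
--         "action": action_slot,
--         "device": device if device is not None else "none",
--         "location": location if location is not None else "none",
--     }
-- ===== Notes on version B (the rewrite author's own statement) =====
-- stated objective: alternative
-- what changed: Fuses A's three separate token scans (intent verbs with last-match-wins, device first-match, location first-match) into one pass over the token list carrying an (intent, device, location) state, with device/location as None-until-set options.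
import Mathlib
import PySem

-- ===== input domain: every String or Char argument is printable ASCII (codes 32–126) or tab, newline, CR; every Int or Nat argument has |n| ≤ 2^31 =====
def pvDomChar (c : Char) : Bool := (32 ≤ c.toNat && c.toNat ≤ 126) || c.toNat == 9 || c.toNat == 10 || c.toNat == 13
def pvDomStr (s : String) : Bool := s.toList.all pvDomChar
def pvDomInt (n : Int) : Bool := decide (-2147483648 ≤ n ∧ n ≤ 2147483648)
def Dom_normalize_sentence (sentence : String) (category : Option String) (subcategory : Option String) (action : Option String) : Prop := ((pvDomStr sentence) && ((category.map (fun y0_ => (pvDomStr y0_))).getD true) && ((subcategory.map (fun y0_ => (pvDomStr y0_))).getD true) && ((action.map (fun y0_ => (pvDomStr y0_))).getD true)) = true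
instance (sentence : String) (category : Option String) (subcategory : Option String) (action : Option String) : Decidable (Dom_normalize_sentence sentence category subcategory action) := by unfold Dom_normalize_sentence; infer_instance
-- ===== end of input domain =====

-- B fuses A's three separate token scans into one pass carrying (intent, device, location); same return value, same single-traversal cost class (objective: alternative decomposition).

-- module-level context shared by both versions (constants of the Python module)
def pvIntentMap : PySem.Dict String String := PySem.Dict.empty  -- intent_map = defaultdict(lambda: "command"), never populated
def pvDevices : List String := ["camera", "lights", "music", "shutters"]
def pvLocations : List String := ["attic", "backyard", "basement", "bathroom", "cellar", "kitchen", "library",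
  "living room", "none", "outside", "restroom", "toilet", "dining room"]
def pvCommandVerbs : List String := ["turn", "activate", "play", "stop", "adjust"]
def pvQueryVerbs : List String := ["check", "query", "status"]
-- nlp = None in the module, so doc = sentence.lower().split() in both versions

-- ===== PORT A =====
-- 'for token in doc: if token in tbl: <slot> = token; break' (A's device/location scans)
def pvScanFirst (doc : List String) (tbl : List String) (cur : String) : String :=
  match doc with
  | [] => cur
  | t :: rest => if t ∈ tbl then t else pvScanFirst rest tbl cur

def normalize_sentence (sentence : String) (category : Option String) (subcategory : Option String) (action : Option String) : List (String × String) :=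
  let doc := PySem.Str.split₀ (PySem.Str.lower sentence)
  let intent := "unknown"
  let device := match category with          -- category.lower() if category else "none"
    | some c => if c = "" then "none" else PySem.Str.lower c
    | none => "none"
  let location := match subcategory with
    | some c => if c = "" then "none" else PySem.Str.lower c
    | none => "none"
  let action_slot := match action with
    | some c => if c = "" then "none" else PySem.Str.lower c
    | none => "none"
  let intent := if pvIntentMap.contains action_slot then
      pvIntentMap.getD action_slot "command"  -- defaultdict read (key present on this branch)
    else
      doc.foldl (fun intent t =>              -- for token in doc (no break: last match wins)
        if t ∈ pvCommandVerbs then "command"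
        else if t ∈ pvQueryVerbs then "query"
        else intent) intent
  let device := match category with           -- if not category: scan with break
    | some c => if c = "" then pvScanFirst doc pvDevices device else device
    | none => pvScanFirst doc pvDevices device
  let location := match subcategory with
    | some c => if c = "" then pvScanFirst doc pvLocations location else location
    | none => pvScanFirst doc pvLocations location
  [("intent", intent), ("action", action_slot), ("device", device), ("location", location)]

-- ===== PORT B =====
def normalize_sentence_alt (sentence : String) (category : Option String) (subcategory : Option String) (action : Option String) : List (String × String) :=
  let doc := PySem.Str.split₀ (PySem.Str.lower sentence)
  let action_slot := match action with
    | some c => if c = "" then "none" else PySem.Str.lower c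
    | none => "none"
  let in_map := pvIntentMap.contains action_slot
  let intent0 := if in_map then pvIntentMap.getD action_slot "command" else "unknown"
  let dev0 : Option String := match category with   -- category.lower() if category else None
    | some c => if c = "" then none else some (PySem.Str.lower c)
    | none => none
  let loc0 : Option String := match subcategory with
    | some c => if c = "" then none else some (PySem.Str.lower c)
    | none => none
  let st := doc.foldl (fun (st : String × Option String × Option String) t =>
      let intent := if in_map then st.1
        else if t ∈ pvCommandVerbs then "command"
        else if t ∈ pvQueryVerbs then "query"
        else st.1
      let dev := if st.2.1 = none ∧ t ∈ pvDevices then some t else st.2.1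
      let loc := if st.2.2 = none ∧ t ∈ pvLocations then some t else st.2.2
      (intent, dev, loc)) (intent0, dev0, loc0)
  [("intent", st.1), ("action", action_slot),
   ("device", st.2.1.getD "none"), ("location", st.2.2.getD "none")]

-- ===== PRECONDITION & SPEC =====
def Spec_normalize_sentence (sentence : String) (category : Option String) (subcategory : Option String) (action : Option String) (out : List (String × String)) : Prop := out = normalize_sentence_alt sentence category subcategory action
instance (sentence : String) (category : Option String) (subcategory : Option String) (action : Option String) (out : List (String × String)) : Decidable (Spec_normalize_sentence sentence category subcategory action out) := by unfold Spec_normalize_sentence; infer_instance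

-- ===== CLAIM (what is proved, stated in full; the proofs are below) =====
def Claim_equal_normalize_sentence : Prop := ∀ (sentence : String) (category : Option String) (subcategory : Option String) (action : Option String), Dom_normalize_sentence sentence category subcategory action → Spec_normalize_sentence sentence category subcategory action (normalize_sentence sentence category subcategory action)

-- ===== LEMMAS AND PROOFS =====

-- A's break-scan is first-match-with-default
lemma pvScanFirst_eq_find (doc tbl : List String) (cur : String) :
    pvScanFirst doc tbl cur = ((doc.find? (fun t => decide (t ∈ tbl))).getD cur) := by
  induction doc with
  | nil => rfl
  | cons t rest ih =>
    by_cases h : t ∈ tbl <;> simp [pvScanFirst, List.find?, h, ih]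

-- B's fused fold decomposes into A's three independent scans (in_map specialised to false: pvIntentMap is empty)
lemma pvFold3_split (doc : List String) (i : String) (d l : Option String) :
    doc.foldl (fun (st : String × Option String × Option String) t =>
      (if t ∈ pvCommandVerbs then "command"
       else if t ∈ pvQueryVerbs then "query"
       else st.1,
       if st.2.1 = none ∧ t ∈ pvDevices then some t else st.2.1,
       if st.2.2 = none ∧ t ∈ pvLocations then some t else st.2.2)) (i, d, l)
    = (doc.foldl (fun intent t =>
        if t ∈ pvCommandVerbs then "command"
        else if t ∈ pvQueryVerbs then "query"
        else intent) i,
       d.or (doc.find? (fun t => decide (t ∈ pvDevices))),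
       l.or (doc.find? (fun t => decide (t ∈ pvLocations)))) := by
  induction doc generalizing i d l with
  | nil => simp
  | cons t rest ih =>
    simp only [List.foldl_cons, ih, List.find?]
    cases d <;> cases l <;>
      by_cases hd : t ∈ pvDevices <;> by_cases hl : t ∈ pvLocations <;>
        simp [hd, hl, Option.or]

-- ===== VERDICT (by name: the statement is the Claim_ definition above) =====
theorem normalize_sentence_spec : Claim_equal_normalize_sentence := by
  intro sentence category subcategory action _
  unfold Spec_normalize_sentence normalize_sentence normalize_sentence_alt
  have hmap : ∀ k, pvIntentMap.contains k = false := by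
    intro k; rfl
  simp only [hmap, Bool.false_eq_true, if_false, pvFold3_split, pvScanFirst_eq_find]
  cases category with
  | none =>
    cases subcategory with
    | none => simp [Option.or]
    | some s => by_cases hs : s = "" <;> simp [hs, Option.or]
  | some c =>
    cases subcategory with
    | none => by_cases hc : c = "" <;> simp [hc, Option.or]
    | some s =>
      by_cases hc : c = "" <;> by_cases hs : s = "" <;> simp [hc, hs, Option.or]
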